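-- pv_equiv track=rewrite | github.com/pypi-data/pypi-mirror-354 | packages/dede/dede-0.1.6.tar.gz/dede-0.1.6/dede/utils.py | heapsched_rt
-- ===== SOURCE A (Python) =====
-- from heapq import heappush, heappop
--
-- def heapsched_rt(lrts, k):
--     '''Return a mathematical parallel runtime with k cpus for incoming jobs.'''
--     h = []
--     for rt in lrts[:k]:
--         heappush(h, rt)
--
--     curr_rt = 0
--     for rt in lrts[k:]:
--         curr_rt = heappop(h)
--         heappush(h, rt + curr_rt)
--
--     while len(h) > 0:
--         curr_rt = heappop(h)
--
--     return curr_rt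
-- ===== SOURCE B (Python) =====
-- def heapsched_rt(lrts, k):
--     '''Return a mathematical parallel runtime with k cpus for incoming jobs.'''
--     loads = list(lrts[:k])
--     for rt in lrts[k:]:
--         best = 0
--         for j in range(1, len(loads)):
--             if loads[j] < loads[best]:
--                 best = j
--         loads[best] += rt
--     return max(loads) if loads else 0
-- ===== Notes on version B (the rewrite author's own statement) =====
-- stated objective: simpler
-- what changed: Replaces the binary min-heap (heappush/heappop) and the final drain loop by a plain list of loads with an explicit linear min-scan per job and a single max() at the end.
import Mathlib
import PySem

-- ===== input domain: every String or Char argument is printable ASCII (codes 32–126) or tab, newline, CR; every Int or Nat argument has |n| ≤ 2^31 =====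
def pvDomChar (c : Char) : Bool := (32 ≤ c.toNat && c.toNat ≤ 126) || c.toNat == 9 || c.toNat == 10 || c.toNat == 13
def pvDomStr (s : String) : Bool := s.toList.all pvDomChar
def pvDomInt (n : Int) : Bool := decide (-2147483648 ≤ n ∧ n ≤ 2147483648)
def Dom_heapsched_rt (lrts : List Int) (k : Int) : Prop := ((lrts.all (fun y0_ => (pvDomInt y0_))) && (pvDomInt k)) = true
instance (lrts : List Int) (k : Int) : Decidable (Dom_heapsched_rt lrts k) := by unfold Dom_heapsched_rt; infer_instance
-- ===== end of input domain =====

-- B replaces A's binary min-heap and drain loop by a plain load list with a linear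
-- min-scan per job and one max() at the end — simpler, not faster.

-- ===== PORT A =====
-- heapq.heappush/heappop are opaque stdlib calls in A; they are ported as an exact
-- priority queue over Int (sorted list: push = ordered insert, pop = head).  This is
-- value-faithful: heappop returns the minimum VALUE of the heap, which for Int does not
-- depend on the heap's internal layout or tie-breaking.
def pvHeappush (h : List Int) (x : Int) : List Int := List.orderedInsert (· ≤ ·) x h

def pvHeappop : List Int → Option (Int × List Int)
  | [] => none
  | x :: t => some (x, t)

-- 'curr_rt = heappop(h); heappush(h, rt + curr_rt)' (the body of A's second loop)
def pvStep (st : List Int × Int) (rt : Int) : List Int × Int :=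
  match pvHeappop st.1 with
  | none => st                      -- Python raises IndexError here (excluded by Pre_)
  | some p => (pvHeappush p.2 (rt + p.1), p.1)

-- 'while len(h) > 0: curr_rt = heappop(h)'
def pvDrain : List Int → Int → Int
  | [], curr => curr
  | x :: t, _ => pvDrain t x

def heapsched_rt (lrts : List Int) (k : Int) : Int :=
  let h := (PySem.List.slice lrts none (some k)).foldl pvHeappush []
  let st := (PySem.List.slice lrts (some k) none).foldl pvStep (h, 0)
  pvDrain st.1 st.2

-- ===== PORT B =====
-- 'best = 0; for j in range(1, len(loads)): if loads[j] < loads[best]: best = j'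
def pvBestIdx (loads : List Int) : Int :=
  (PySem.List.pyRange 1 (PySem.List.len loads) 1).foldl
    (fun best j =>
      if PySem.List.pyGetD loads j 0 < PySem.List.pyGetD loads best 0 then j else best) 0

-- 'loads[best] += rt'
def pvAssign (loads : List Int) (rt : Int) : List Int :=
  let best := pvBestIdx loads
  PySem.List.pySetD loads best (PySem.List.pyGetD loads best 0 + rt)

def heapsched_rt_alt (lrts : List Int) (k : Int) : Int :=
  let loads := (PySem.List.slice lrts (some k) none).foldl pvAssign
    (PySem.List.slice lrts none (some k))
  match PySem.List.max? loads (fun x => x) with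
  | some m => m
  | none => 0

-- ===== PRECONDITION & SPEC =====
-- Pre_ excludes exactly the inputs where the Python A raises IndexError (heappop of an
-- empty heap: lrts[:k] empty while lrts[k:] is not); B raises IndexError there too.
def Pre_heapsched_rt (lrts : List Int) (k : Int) : Prop :=
  PySem.List.slice lrts none (some k) = [] → PySem.List.slice lrts (some k) none = []
instance (lrts : List Int) (k : Int) : Decidable (Pre_heapsched_rt lrts k) := by
  unfold Pre_heapsched_rt; infer_instance

def pvWitness_heapsched_rt : List Int × Int := ([3, 1, 2, 5], 2)

def Spec_heapsched_rt (lrts : List Int) (k : Int) (out : Int) : Prop := out = heapsched_rt_alt lrts k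
instance (lrts : List Int) (k : Int) (out : Int) : Decidable (Spec_heapsched_rt lrts k out) := by unfold Spec_heapsched_rt; infer_instance

-- ===== CLAIM (what is proved, stated in full; the proofs are below) =====
def Claim_equal_heapsched_rt : Prop := ∀ (lrts : List Int) (k : Int), Dom_heapsched_rt lrts k → Pre_heapsched_rt lrts k → Spec_heapsched_rt lrts k (heapsched_rt lrts k)

-- ===== LEMMAS AND PROOFS =====

-- multiset effect of writing position i
lemma pv_ms_set (l : List Int) (i : Nat) (x d : Int) (hi : i < l.length) :
    (↑(l.set i x) : Multiset Int) + {l.getD i d} = (↑l : Multiset Int) + {x} := by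
  induction l generalizing i with
  | nil => simp at hi
  | cons a t ih =>
    cases i with
    | zero =>
      simp only [List.set, List.getD_cons_zero, ← Multiset.cons_coe, ← Multiset.singleton_add]
      abel
    | succ n =>
      simp only [List.set, List.getD_cons_succ, ← Multiset.cons_coe, ← Multiset.singleton_add]
      rw [add_assoc, ih n (by simpa using hi), ← add_assoc]

-- invariant of the explicit min scan
lemma pv_scan_inv (loads : List Int) (js : List Int) :
    ∀ b : Int, 0 ≤ b → b < loads.length → (∀ j ∈ js, 0 ≤ j ∧ j < loads.length) →
    let r := js.foldl (fun best j =>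
      if PySem.List.pyGetD loads j 0 < PySem.List.pyGetD loads best 0 then j else best) b
    (0 ≤ r ∧ r < loads.length) ∧
      PySem.List.pyGetD loads r 0 ≤ PySem.List.pyGetD loads b 0 ∧
      ∀ j ∈ js, PySem.List.pyGetD loads r 0 ≤ PySem.List.pyGetD loads j 0 := by
  induction js with
  | nil => intro b hb0 hbl _; exact ⟨⟨hb0, hbl⟩, le_refl _, by simp⟩
  | cons j js ih =>
    intro b hb0 hbl hmem
    simp only [List.foldl_cons]
    by_cases hlt : PySem.List.pyGetD loads j 0 < PySem.List.pyGetD loads b 0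
    · rw [if_pos hlt]
      have hj := hmem j (by simp)
      obtain ⟨hr, hle, hall⟩ := ih j hj.1 hj.2 (fun x hx => hmem x (by simp [hx]))
      refine ⟨hr, le_trans hle (le_of_lt hlt), ?_⟩
      intro x hx
      rcases List.mem_cons.mp hx with h | h
      · subst h; exact hle
      · exact hall x h
    · rw [if_neg hlt]
      obtain ⟨hr, hle, hall⟩ := ih b hb0 hbl (fun x hx => hmem x (by simp [hx]))
      refine ⟨hr, hle, ?_⟩
      intro x hx
      rcases List.mem_cons.mp hx with h | h
      · subst h; exact le_trans hle (le_of_not_gt hlt)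
      · exact hall x h

-- pvBestIdx picks a position of a minimal element
lemma pv_bestIdx_spec (loads : List Int) (hne : loads ≠ []) :
    0 ≤ pvBestIdx loads ∧ pvBestIdx loads < loads.length ∧
      ∀ x ∈ loads, PySem.List.pyGetD loads (pvBestIdx loads) 0 ≤ x := by
  have hlen : 0 < loads.length := List.length_pos_iff.mpr hne
  have hmem : ∀ j ∈ PySem.List.pyRange 1 (PySem.List.len loads) 1, 0 ≤ j ∧ j < loads.length := by
    intro j hj
    have := (PySem.List.mem_pyRange_one).mp hj
    simp only [PySem.List.len_eq] at this
    omega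
  obtain ⟨hr, hle, hall⟩ := pv_scan_inv loads (PySem.List.pyRange 1 (PySem.List.len loads) 1)
    0 le_rfl (by exact_mod_cast hlen) hmem
  refine ⟨hr.1, hr.2, ?_⟩
  intro x hx
  obtain ⟨n, hn, rfl⟩ := List.mem_iff_getElem.mp hx
  have hxg : PySem.List.pyGetD loads (n : Int) 0 = loads[n] := by
    rw [PySem.List.pyGetD_eq_getElem loads 0 (by omega) (by exact_mod_cast hn)]
    simp
  rcases Nat.eq_zero_or_pos n with h0 | h1
  · subst h0
    calc PySem.List.pyGetD loads (pvBestIdx loads) 0 ≤ PySem.List.pyGetD loads 0 0 := hle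
      _ = loads[0] := by simpa using hxg
  · have hj : (n : Int) ∈ PySem.List.pyRange 1 (PySem.List.len loads) 1 := by
      rw [PySem.List.mem_pyRange_one]
      simp only [PySem.List.len_eq]
      omega
    calc PySem.List.pyGetD loads (pvBestIdx loads) 0 ≤ PySem.List.pyGetD loads (n : Int) 0 :=
        hall _ hj
      _ = loads[n] := hxg

-- the initial heap build: sorted and a permutation of the input
lemma pv_init_sorted_perm (xs : List Int) :
    ∀ acc : List Int, acc.Pairwise (· ≤ ·) →
      (xs.foldl pvHeappush acc).Pairwise (· ≤ ·) ∧ (xs.foldl pvHeappush acc).Perm (acc ++ xs) := by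
  induction xs with
  | nil => intro acc hs; exact ⟨hs, by simp⟩
  | cons a xs ih =>
    intro acc hs
    simp only [List.foldl_cons]
    obtain ⟨h1, h2⟩ := ih (pvHeappush acc a) (List.Pairwise.orderedInsert a acc hs)
    refine ⟨h1, h2.trans ?_⟩
    exact (((List.perm_orderedInsert _ a acc).append_right xs).trans List.perm_middle.symm)

-- pvAssign preserves length
lemma pv_assign_length (loads : List Int) (rt : Int) : (pvAssign loads rt).length = loads.length := by
  simp [pvAssign, PySem.List.length_pySetD]

lemma pv_foldl_assign_length (rest : List Int) :
    ∀ loads : List Int, (rest.foldl pvAssign loads).length = loads.length := by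
  induction rest with
  | nil => intro loads; rfl
  | cons rt rest ih => intro loads; rw [List.foldl_cons, ih, pv_assign_length]

-- the main loop invariant: A's heap stays sorted and a permutation of B's loads
lemma pv_loop_inv (rest : List Int) :
    ∀ (h : List Int) (c : Int) (loads : List Int), h.Pairwise (· ≤ ·) → h.Perm loads →
      ((rest.foldl pvStep (h, c)).1.Pairwise (· ≤ ·) ∧
        (rest.foldl pvStep (h, c)).1.Perm (rest.foldl pvAssign loads)) := by
  induction rest with
  | nil => intro h c loads hs hp; exact ⟨hs, hp⟩
  | cons rt rest ih =>
    intro h c loads hs hp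
    match h with
    | [] =>
      have hl : loads = [] := (List.perm_nil.mp hp.symm)
      subst hl
      have ha : pvAssign [] rt = [] := List.eq_nil_of_length_eq_zero (pv_assign_length [] rt)
      simpa [pvStep, pvHeappop, ha] using ih [] c [] List.Pairwise.nil (List.Perm.refl [])
    | m :: t =>
      have hne : loads ≠ [] := by
        intro h0; rw [h0] at hp; exact (List.cons_ne_nil m t) (List.perm_nil.mp hp)
      obtain ⟨hb0, hbl, hbmin⟩ := pv_bestIdx_spec loads hne
      set b := pvBestIdx loads with hbdef
      -- the scanned minimum equals the head of the sorted heap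
      have hmhead : ∀ x ∈ m :: t, m ≤ x := by
        intro x hx
        rcases List.mem_cons.mp hx with h | h
        · exact le_of_eq h.symm
        · exact (List.pairwise_cons.mp hs).1 x h
      have hget : PySem.List.pyGetD loads b 0 = loads[b.toNat] := by
        rw [PySem.List.pyGetD_eq_getElem loads 0 hb0 (by exact_mod_cast hbl)]
      have hbm : PySem.List.pyGetD loads b 0 = m := by
        refine le_antisymm (hbmin m (hp.subset (List.mem_cons_self))) ?_
        refine hmhead _ (hp.symm.subset ?_)
        rw [hget]; exact List.getElem_mem _
      -- one step of each program
      have hstepA : pvStep (m :: t, c) rt = (pvHeappush t (rt + m), m) := rfl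
      have hstepB : pvAssign loads rt = loads.set b.toNat (m + rt) := by
        simp only [pvAssign, ← hbdef, hbm]
        exact PySem.List.pySetD_of_nonneg loads _ hb0
      -- sortedness of the new heap
      have hs' : (pvHeappush t (rt + m)).Pairwise (· ≤ ·) :=
        List.Pairwise.orderedInsert _ t (List.pairwise_cons.mp hs).2
      -- permutation of the new heap with the new loads
      have hp' : (pvHeappush t (rt + m)).Perm (loads.set b.toNat (m + rt)) := by
        apply Multiset.coe_eq_coe.mp
        have e2 := pv_ms_set loads b.toNat (m + rt) 0 (by omega)
        have egd : loads.getD b.toNat 0 = m := by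
          rw [List.getD_eq_getElem _ _ (by omega), ← hget, hbm]
        rw [egd] at e2
        have e1 : (↑(pvHeappush t (rt + m)) : Multiset Int) = ↑((rt + m) :: t) :=
          Multiset.coe_eq_coe.mpr (List.perm_orderedInsert _ _ t)
        have e3 : (↑loads : Multiset Int) = ↑(m :: t) := Multiset.coe_eq_coe.mpr hp.symm
        rw [e3] at e2
        have : (↑((rt + m) :: t) : Multiset Int) + {m} = ↑(loads.set b.toNat (m + rt)) + {m} := by
          rw [e2, add_comm rt m]
          simp only [← Multiset.cons_coe, ← Multiset.singleton_add]
          abel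
        rw [e1]
        exact add_right_cancel this
      rw [List.foldl_cons, List.foldl_cons, hstepA, hstepB]
      exact ih _ m _ hs' hp'

lemma pv_drain_getLast (l : List Int) : ∀ (c : Int) (hne : l ≠ []), pvDrain l c = l.getLast hne := by
  induction l with
  | nil => intro c hne; exact absurd rfl hne
  | cons x t ih =>
    intro c hne
    match t with
    | [] => rfl
    | y :: u =>
      rw [show pvDrain (x :: y :: u) c = pvDrain (y :: u) x from rfl,
        ih x (List.cons_ne_nil y u), List.getLast_cons (List.cons_ne_nil y u)]

lemma pv_sorted_le_getLast (l : List Int) (hne : l ≠ []) (hs : l.Pairwise (· ≤ ·)) :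
    ∀ x ∈ l, x ≤ l.getLast hne := by
  induction l with
  | nil => exact absurd rfl hne
  | cons a t ih =>
    intro x hx
    match t with
    | [] =>
      simp only [List.mem_singleton] at hx
      simp [hx]
    | y :: u =>
      rw [List.getLast_cons (List.cons_ne_nil y u)]
      rcases List.mem_cons.mp hx with h | h
      · subst h
        exact le_trans ((List.pairwise_cons.mp hs).1 _ (List.getLast_mem _))
          le_rfl
      · exact ih (List.cons_ne_nil y u) (List.pairwise_cons.mp hs).2 x h

-- ===== VERDICT (by name: the statement is the Claim_ definition above) =====
theorem heapsched_rt_spec : Claim_equal_heapsched_rt := by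
  intro lrts k _ hpre
  unfold Spec_heapsched_rt heapsched_rt heapsched_rt_alt
  set init := PySem.List.slice lrts none (some k) with hinitdef
  set rest := PySem.List.slice lrts (some k) none with hrestdef
  by_cases hinit : init = []
  · have hrest : rest = [] := hpre hinit
    rw [hinit, hrest]
    cases hmax : PySem.List.max? ([] : List Int) (fun x => x) with
    | none => simp [hmax, pvDrain]
    | some m => exact absurd (PySem.List.max?_mem hmax) (by simp)
  · obtain ⟨hsort0, hperm0⟩ := pv_init_sorted_perm init [] List.Pairwise.nil
    have hperm0' : (init.foldl pvHeappush []).Perm init := by simpa using hperm0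
    obtain ⟨hsortN, hpermN⟩ := pv_loop_inv rest (init.foldl pvHeappush []) 0 init hsort0 hperm0'
    set hN := (rest.foldl pvStep (init.foldl pvHeappush [], 0)).1 with hNdef
    set loadsN := rest.foldl pvAssign init with loadsNdef
    have hlenN : loadsN.length = init.length := pv_foldl_assign_length rest init
    have hNne : hN ≠ [] := by
      intro h0
      have := hpermN.length_eq
      rw [h0] at this
      simp only [List.length_nil] at this
      exact hinit (List.eq_nil_of_length_eq_zero (by omega))
    rw [pv_drain_getLast _ _ hNne]
    cases hmax : PySem.List.max? loadsN (fun x => x) with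
    | none =>
      have h0 : loadsN = [] := (PySem.List.max?_eq_none_iff _ _).mp hmax
      have hz : init.length = 0 := by rw [← hlenN, h0]; rfl
      exact absurd (List.eq_nil_of_length_eq_zero hz) hinit
    | some M =>
      simp only [hmax]
      refine le_antisymm ?_ ?_
      · simpa using PySem.List.max?_isMax hmax _ (hpermN.subset (List.getLast_mem hNne))
      · exact pv_sorted_le_getLast hN hNne hsortN M (hpermN.symm.subset (PySem.List.max?_mem hmax))
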